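-- pv_equiv track=rewrite | github.com/PuffedRiceCrackers/algorithmChallenge | 3 190612 FENCE DQ.py | maxWidthIncluding
-- ===== SOURCE A (Python) =====
-- def maxWidthIncluding(plates, first, last):
--     mid = int((first + last) / 2)
--     tempMax = -1
--     for length in range(last - first):
--         if mid - length >= first:
--             start = mid-length
--         elif mid - length < first:
--             start = first
--         end = start + length
--         while start <= mid and end <= last:
--             tempMax = max(tempMax, min(plates[start:end + 1]) * (length+1))
--             start += 1
--             end += 1
--     return tempMax
-- ===== SOURCE B (Python) =====
-- def maxWidthIncluding(plates, first, last):
--     # Enumerate the windows containing mid by left end (descending) then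
--     # right end, keeping running minima instead of re-scanning a slice.
--     if last <= first:
--         return -1
--     mid = (first + last) // 2
--     best = -1
--     leftmin = None
--     for s in range(mid, first - 1, -1):
--         leftmin = plates[s] if leftmin is None else min(leftmin, plates[s])
--         m = leftmin
--         for e in range(mid, last + 1):
--             if e > mid:
--                 m = min(m, plates[e])
--             if e - s < last - first:
--                 best = max(best, m * (e - s + 1))
--     return best
-- ===== Notes on version B (the rewrite author's own statement) =====
-- stated objective: alternative
-- what changed: B enumerates the windows containing mid by left end (descending) then right end, maintaining running minima, instead of A's per-window min() over a fresh slice inside a width-by-position double loop.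
-- outside the precondition, e.g. on maxWidthIncluding([1, 2], -1, 4): A returns 10, B raises IndexError; on maxWidthIncluding([3, -2, 2, 3, 0], 3, 5): A returns 0, B raises IndexError
import Mathlib
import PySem

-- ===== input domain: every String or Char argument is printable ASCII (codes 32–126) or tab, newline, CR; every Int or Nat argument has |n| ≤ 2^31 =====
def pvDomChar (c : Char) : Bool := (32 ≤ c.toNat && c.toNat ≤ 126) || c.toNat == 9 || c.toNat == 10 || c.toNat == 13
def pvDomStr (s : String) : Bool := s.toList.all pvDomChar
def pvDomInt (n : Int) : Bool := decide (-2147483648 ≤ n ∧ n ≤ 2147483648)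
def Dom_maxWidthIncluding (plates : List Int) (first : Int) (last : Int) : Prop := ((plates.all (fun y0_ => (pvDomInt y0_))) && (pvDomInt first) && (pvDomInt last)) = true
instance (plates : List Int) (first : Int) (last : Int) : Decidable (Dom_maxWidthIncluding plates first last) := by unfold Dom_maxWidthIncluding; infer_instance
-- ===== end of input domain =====

-- B enumerates the windows containing mid by left end then right end with
-- running minima, instead of A's fresh slice-minimum per window inside a
-- width-by-position double loop (objective: alternative).

-- ===== PORT A =====
-- A's inner 'while start <= mid and end <= last' loop; min(plates[start:end+1])
-- is (min? ∘ slice): min of an empty slice raises ValueError in Python, the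
-- .getD 0 default is reached only outside Pre_.
def pvAWhile (plates : List Int) (mid last length : Int) (start end_ tempMax : Int) : Int :=
  if h : start ≤ mid ∧ end_ ≤ last then
    pvAWhile plates mid last length (start + 1) (end_ + 1)
      (max tempMax ((PySem.List.min? (PySem.List.slice plates (some start) (some (end_ + 1))) (fun x => x)).getD 0 * (length + 1)))
  else tempMax
termination_by (mid + 1 - start).toNat
decreasing_by omega

-- int((first+last)/2): float division then truncation toward zero; exact as
-- Int.tdiv on Dom (|first+last| ≤ 2^32 < 2^53).
def maxWidthIncluding (plates : List Int) (first : Int) (last : Int) : Int :=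
  let mid := Int.tdiv (first + last) 2
  (PySem.List.pyRange 0 (last - first) 1).foldl
    (fun tempMax length =>
      let start := if mid - length ≥ first then mid - length else first
      pvAWhile plates mid last length start (start + length) tempMax)
    (-1)

-- ===== PORT B =====
-- plates[s] / plates[e] → pyGet?; IndexError (none) is reached only outside Pre_.
def maxWidthIncluding_alt (plates : List Int) (first : Int) (last : Int) : Int :=
  if last ≤ first then (-1 : Int)
  else
    let mid := PySem.Int.floordiv (first + last) 2
    ((PySem.List.pyRange mid (first - 1) (-1)).foldl
      (fun (st : Int × Option Int) s =>
        let ps := (PySem.List.pyGet? plates s).getD 0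
        let leftmin := match st.2 with
          | none => ps
          | some m => min m ps
        let inner := (PySem.List.pyRange mid (last + 1) 1).foldl
          (fun (ac : Int × Int) e =>
            let m := if mid < e then min ac.2 ((PySem.List.pyGet? plates e).getD 0) else ac.2
            let best := if e - s < last - first then max ac.1 (m * (e - s + 1)) else ac.1
            (best, m))
          (st.1, leftmin)
        (inner.1, some leftmin))
      ((-1 : Int), (none : Option Int))).1

-- ===== PRECONDITION & SPEC =====
-- Pre_ excludes inputs with first < last but first < 0 or last ≥ len(plates):
-- there A's value comes from Python's slice clamping / negative-index wraparound
-- (or A raises ValueError on an empty slice), while B's direct indexing raises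
-- IndexError.
def Pre_maxWidthIncluding (plates : List Int) (first : Int) (last : Int) : Prop :=
  last ≤ first ∨ (0 ≤ first ∧ last < (plates.length : Int))
instance (plates : List Int) (first : Int) (last : Int) : Decidable (Pre_maxWidthIncluding plates first last) := by unfold Pre_maxWidthIncluding; infer_instance

def pvWitness_maxWidthIncluding : List Int × Int × Int := ([3, 1, 2], 0, 2)

def Spec_maxWidthIncluding (plates : List Int) (first : Int) (last : Int) (out : Int) : Prop := out = maxWidthIncluding_alt plates first last
instance (plates : List Int) (first : Int) (last : Int) (out : Int) : Decidable (Spec_maxWidthIncluding plates first last out) := by unfold Spec_maxWidthIncluding; infer_instance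

-- ===== CLAIM (what is proved, stated in full; the proofs are below) =====
def Claim_equal_maxWidthIncluding : Prop := ∀ (plates : List Int) (first : Int) (last : Int), Dom_maxWidthIncluding plates first last → Pre_maxWidthIncluding plates first last → Spec_maxWidthIncluding plates first last (maxWidthIncluding plates first last)

-- ===== LEMMAS AND PROOFS =====

-- The window plates[s..e] and its minimum (0 if the window is empty).
def pvWin (plates : List Int) (s e : Int) : List Int :=
  (plates.drop s.toNat).take (e + 1 - s).toNat
def pvMval (plates : List Int) (s e : Int) : Int :=
  match pvWin plates s e with
  | [] => 0
  | x :: t => t.foldl min x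

lemma pvFoldlMinComm (l : List Int) : ∀ a b : Int, l.foldl min (min a b) = min a (l.foldl min b) := by
  induction l with
  | nil => intro a b; simp
  | cons c t ih =>
    intro a b
    simp only [List.foldl_cons]
    rw [min_assoc, ih]

-- A's slice-min expression equals pvMval.
lemma pvMinSlice_eq (plates : List Int) (s e : Int) (hs : 0 ≤ s) (he : 0 ≤ e + 1) :
    (PySem.List.min? (PySem.List.slice plates (some s) (some (e + 1))) (fun x => x)).getD 0
      = pvMval plates s e := by
  rw [PySem.List.slice_toNat plates hs he]
  have hnat : (e + 1).toNat - s.toNat = (e + 1 - s).toNat := by omega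
  rw [hnat]
  cases h : (plates.drop s.toNat).take (e + 1 - s).toNat with
  | nil => simp [pvMval, pvWin, h, PySem.List.min?]
  | cons x t =>
    rw [PySem.List.min?_id_cons]
    simp [pvMval, pvWin, h]

lemma pvMval_cons (plates : List Int) (s e x : Int) (t : List Int)
    (h : pvWin plates s e = x :: t) : pvMval plates s e = t.foldl min x := by
  simp [pvMval, h]

lemma pvWin_ne_nil (plates : List Int) (s e : Int) (hs : 0 ≤ s) (hse : s ≤ e)
    (he : e < (plates.length : Int)) : pvWin plates s e ≠ [] := by
  intro h
  have := congrArg List.length h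
  simp [pvWin] at this
  omega

lemma pvWin_self (plates : List Int) (s : Int) (hs : 0 ≤ s) (hlt : s < (plates.length : Int)) :
    pvWin plates s s = [plates[s.toNat]'(by omega)] := by
  unfold pvWin
  have h1 : (s + 1 - s).toNat = 1 := by omega
  have h0 : s.toNat < plates.length := by omega
  rw [h1, List.drop_eq_getElem_cons h0]
  rfl

lemma pvWin_right (plates : List Int) (s e : Int) (hs : 0 ≤ s) (hse : s ≤ e)
    (he : e < (plates.length : Int)) :
    pvWin plates s e = pvWin plates s (e - 1) ++ [plates[e.toNat]'(by omega)] := by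
  unfold pvWin
  have h1 : (e + 1 - s).toNat = (e - s).toNat + 1 := by omega
  have h2 : (e - 1 + 1 - s).toNat = (e - s).toNat := by omega
  rw [h1, h2, List.take_add_one]
  congr 1
  rw [List.getElem?_drop]
  have h3 : s.toNat + (e - s).toNat = e.toNat := by omega
  rw [h3, List.getElem?_eq_getElem (by omega)]
  rfl

lemma pvWin_left (plates : List Int) (s e : Int) (hs : 0 ≤ s) (hse : s ≤ e)
    (he : e < (plates.length : Int)) :
    pvWin plates s e = plates[s.toNat]'(by omega) :: pvWin plates (s + 1) e := by
  unfold pvWin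
  have h0 : s.toNat < plates.length := by omega
  rw [List.drop_eq_getElem_cons h0]
  have h1 : (e + 1 - s).toNat = (e + 1 - (s + 1)).toNat + 1 := by omega
  rw [h1, List.take_succ_cons]
  have h2 : s.toNat + 1 = (s + 1).toNat := by omega
  rw [h2]

lemma pvGet_eq (plates : List Int) (i : Int) (h0 : 0 ≤ i) (h1 : i < (plates.length : Int)) :
    (PySem.List.pyGet? plates i).getD 0 = plates[i.toNat]'(by omega) :=
  PySem.List.pyGetD_eq_getElem plates 0 h0 h1

lemma pvMval_self (plates : List Int) (s : Int) (hs : 0 ≤ s) (hlt : s < (plates.length : Int)) :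
    pvMval plates s s = (PySem.List.pyGet? plates s).getD 0 := by
  rw [pvMval_cons plates s s _ [] (pvWin_self plates s hs hlt), pvGet_eq plates s hs hlt]
  rfl

lemma pvMval_right (plates : List Int) (s e : Int) (hs : 0 ≤ s) (hse : s < e)
    (he : e < (plates.length : Int)) :
    pvMval plates s e = min (pvMval plates s (e - 1)) ((PySem.List.pyGet? plates e).getD 0) := by
  cases hw : pvWin plates s (e - 1) with
  | nil => exact absurd hw (pvWin_ne_nil plates s (e - 1) hs (by omega) (by omega))
  | cons x t =>
    have h := pvWin_right plates s e hs (by omega) he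
    rw [hw] at h
    rw [pvMval_cons plates s e x (t ++ [plates[e.toNat]'(by omega)]) (by simpa using h)]
    rw [List.foldl_append, pvMval_cons plates s (e - 1) x t hw,
      pvGet_eq plates e (by omega) he]
    rfl

lemma pvMval_left (plates : List Int) (s e : Int) (hs : 0 ≤ s) (hse : s < e)
    (he : e < (plates.length : Int)) :
    pvMval plates s e = min ((PySem.List.pyGet? plates s).getD 0) (pvMval plates (s + 1) e) := by
  cases hw : pvWin plates (s + 1) e with
  | nil => exact absurd hw (pvWin_ne_nil plates (s + 1) e (by omega) (by omega) he)
  | cons y t =>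
    have h := pvWin_left plates s e hs (by omega) he
    rw [hw] at h
    rw [pvMval_cons plates s e _ (y :: t) h, List.foldl_cons, pvFoldlMinComm,
      pvMval_cons plates (s + 1) e y t hw, pvGet_eq plates s hs (by omega)]

-- foldl max depends only on membership (max is idempotent).
lemma pvFoldlMaxMemIff (l₁ l₂ : List Int) (t : Int) (h : ∀ x, x ∈ l₁ ↔ x ∈ l₂) :
    l₁.foldl max t = l₂.foldl max t := by
  apply le_antisymm
  · rcases PySem.List.foldl_max_mem l₁ t with h1 | h1
    · rw [h1]; exact (PySem.List.le_foldl_max l₂ t).1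
    · exact (PySem.List.le_foldl_max l₂ t).2 _ ((h _).1 h1)
  · rcases PySem.List.foldl_max_mem l₂ t with h1 | h1
    · rw [h1]; exact (PySem.List.le_foldl_max l₁ t).1
    · exact (PySem.List.le_foldl_max l₁ t).2 _ ((h _).2 h1)

lemma pvFoldlMaxFlatMap (g : Int → List Int) (L : List Int) (t : Int) :
    (L.flatMap g).foldl max t = L.foldl (fun acc x => (g x).foldl max acc) t := by
  induction L generalizing t with
  | nil => simp
  | cons x L ih => simp [List.foldl_append, ih]

-- value lists enumerated by the two programs
def pvValsA (plates : List Int) (first mid last : Int) : List Int :=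
  (PySem.List.pyRange 0 (last - first) 1).flatMap (fun length =>
    (PySem.List.pyRange (if mid - length ≥ first then mid - length else first)
        (min mid (last - length) + 1) 1).map
      (fun s => pvMval plates s (s + length) * (length + 1)))

def pvValsB (plates : List Int) (first mid last : Int) : List Int :=
  (PySem.List.pyRange mid (first - 1) (-1)).flatMap (fun s =>
    ((PySem.List.pyRange mid (last + 1) 1).filter (fun e => decide (e - s < last - first))).map
      (fun e => pvMval plates s e * (e - s + 1)))

lemma pvMemValsA (plates : List Int) (first mid last x : Int) :
    x ∈ pvValsA plates first mid last ↔
      ∃ s e : Int, (first ≤ s ∧ s ≤ mid ∧ mid ≤ e ∧ e ≤ last ∧ e - s < last - first) ∧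
        x = pvMval plates s e * (e - s + 1) := by
  simp only [pvValsA, List.mem_flatMap, List.mem_map, PySem.List.mem_pyRange_one]
  constructor
  · rintro ⟨length, ⟨h0, h1⟩, s, hs, rfl⟩
    refine ⟨s, s + length, ?_, ?_⟩
    · split_ifs at hs with h <;> omega
    · have : s + length - s + 1 = length + 1 := by ring
      rw [this]
  · rintro ⟨s, e, ⟨h1, h2, h3, h4, h5⟩, rfl⟩
    refine ⟨e - s, ⟨by omega, by omega⟩, s, ?_, ?_⟩
    · constructor
      · split_ifs with h <;> omega
      · omega
    · have h6 : s + (e - s) = e := by ring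
      rw [h6]

lemma pvMemValsB (plates : List Int) (first mid last x : Int) :
    x ∈ pvValsB plates first mid last ↔
      ∃ s e : Int, (first ≤ s ∧ s ≤ mid ∧ mid ≤ e ∧ e ≤ last ∧ e - s < last - first) ∧
        x = pvMval plates s e * (e - s + 1) := by
  simp only [pvValsB, List.mem_flatMap, List.mem_map, List.mem_filter,
    PySem.List.mem_pyRange_neg_one, PySem.List.mem_pyRange_one, decide_eq_true_eq]
  constructor
  · rintro ⟨s, hs, e, ⟨⟨he1, he2⟩, hg⟩, rfl⟩
    exact ⟨s, e, ⟨by omega, by omega, he1, by omega, hg⟩, rfl⟩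
  · rintro ⟨s, e, ⟨h1, h2, h3, h4, h5⟩, rfl⟩
    exact ⟨s, ⟨by omega, h2⟩, e, ⟨⟨h3, by omega⟩, h5⟩, rfl⟩

-- A's inner while loop enumerates the windows of width length+1.
lemma pvAWhile_eq (plates : List Int) (mid last length : Int) (hl : 0 ≤ length) :
    ∀ start t : Int, 0 ≤ start →
      pvAWhile plates mid last length start (start + length) t
        = ((PySem.List.pyRange start (min mid (last - length) + 1) 1).map
            (fun s => pvMval plates s (s + length) * (length + 1))).foldl max t := by
  intro start t hs
  induction hN : (mid + 1 - start).toNat using Nat.strong_induction_on generalizing start t with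
  | _ n ih =>
  rw [pvAWhile]
  split
  · next h =>
    have hlt : start < min mid (last - length) + 1 := by omega
    rw [PySem.List.pyRange_one_cons hlt, List.map_cons, List.foldl_cons,
      pvMinSlice_eq plates start (start + length) hs (by omega)]
    have harg : start + length + 1 = start + 1 + length := by ring
    rw [harg, ih (mid + 1 - (start + 1)).toNat (by omega) (start + 1) _ (by omega) rfl]
  · next h =>
    have hle : min mid (last - length) + 1 ≤ start := by omega
    rw [PySem.List.pyRange_one_eq_nil hle]
    simp

-- A as a fold of the value list.
lemma pvA_eq (plates : List Int) (first last : Int) (h0 : 0 ≤ first) :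
    maxWidthIncluding plates first last
      = (pvValsA plates first (Int.tdiv (first + last) 2) last).foldl max (-1) := by
  unfold maxWidthIncluding pvValsA
  rw [pvFoldlMaxFlatMap]
  apply PySem.List.foldl_congr_mem
  intro acc length hmem
  rw [PySem.List.mem_pyRange_one] at hmem
  dsimp only
  rw [pvAWhile_eq plates _ last length (by omega) _ acc (by split <;> omega)]

-- B's inner loop: running minimum m and the guarded running maximum.
lemma pvBInner_eq (plates : List Int) (first last mid s : Int)
    (hs0 : 0 ≤ s) (hsm : s ≤ mid) (hlen : last < (plates.length : Int)) :
    ∀ (n : Nat) (e b0 : Int), (last + 1 - e).toNat = n → mid ≤ e →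
      (List.foldl (fun (ac : Int × Int) e =>
            (if e - s < last - first then
                max ac.1 ((if mid < e then min ac.2 ((PySem.List.pyGet? plates e).getD 0) else ac.2) * (e - s + 1))
              else ac.1,
             if mid < e then min ac.2 ((PySem.List.pyGet? plates e).getD 0) else ac.2))
          (b0, pvMval plates s (max (e - 1) mid)) (PySem.List.pyRange e (last + 1) 1)).1
        = (((PySem.List.pyRange e (last + 1) 1).filter
              (fun e => decide (e - s < last - first))).map
            (fun e => pvMval plates s e * (e - s + 1))).foldl max b0 := by
  intro n
  induction n using Nat.strong_induction_on with
  | _ n ih =>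
  intro e b0 hn he
  by_cases hel : e ≤ last
  · rw [PySem.List.pyRange_one_cons (by omega), List.foldl_cons, List.filter_cons]
    dsimp only
    have hm : (if mid < e then min (pvMval plates s (max (e - 1) mid)) ((PySem.List.pyGet? plates e).getD 0)
          else pvMval plates s (max (e - 1) mid)) = pvMval plates s e := by
      by_cases hme : mid < e
      · rw [if_pos hme]
        rw [show max (e - 1) mid = e - 1 from by omega,
          ← pvMval_right plates s e hs0 (by omega) (by omega)]
      · rw [if_neg hme]
        rw [show max (e - 1) mid = e from by omega]
    rw [hm]
    have hnext : pvMval plates s e = pvMval plates s (max (e + 1 - 1) mid) := by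
      rw [show max (e + 1 - 1) mid = e from by omega]
    by_cases hg : e - s < last - first
    · rw [if_pos hg, if_pos (by simpa using hg), List.map_cons, List.foldl_cons]
      rw [hnext]
      exact ih (last + 1 - (e + 1)).toNat (by omega) (e + 1) _ rfl (by omega)
    · rw [if_neg hg, if_neg (by simpa using hg)]
      rw [hnext]
      exact ih (last + 1 - (e + 1)).toNat (by omega) (e + 1) _ rfl (by omega)
  · rw [PySem.List.pyRange_one_eq_nil (by omega)]
    simp

-- B's outer loop.
lemma pvBOuter_eq (plates : List Int) (first last mid : Int)
    (h0 : 0 ≤ first) (_hm1 : first ≤ mid) (hm2 : mid ≤ last) (hlen : last < (plates.length : Int)) :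
    ∀ (n : Nat) (s b0 : Int) (mo : Option Int), (s - (first - 1)).toNat = n →
      first - 1 ≤ s → s ≤ mid →
      mo = (if s = mid then none else some (pvMval plates (s + 1) mid)) →
      (List.foldl (fun (st : Int × Option Int) s =>
            ((List.foldl
                (fun (ac : Int × Int) e =>
                  (if e - s < last - first then
                      max ac.1 ((if mid < e then min ac.2 ((PySem.List.pyGet? plates e).getD 0) else ac.2) * (e - s + 1))
                    else ac.1,
                   if mid < e then min ac.2 ((PySem.List.pyGet? plates e).getD 0) else ac.2))
                (st.1,
                  match st.2 with
                  | none => (PySem.List.pyGet? plates s).getD 0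
                  | some m => min m ((PySem.List.pyGet? plates s).getD 0))
                (PySem.List.pyRange mid (last + 1) 1)).1,
             some
               (match st.2 with
               | none => (PySem.List.pyGet? plates s).getD 0
               | some m => min m ((PySem.List.pyGet? plates s).getD 0))))
          (b0, mo) (PySem.List.pyRange s (first - 1) (-1))).1
        = ((PySem.List.pyRange s (first - 1) (-1)).flatMap (fun s =>
            ((PySem.List.pyRange mid (last + 1) 1).filter
                (fun e => decide (e - s < last - first))).map
              (fun e => pvMval plates s e * (e - s + 1)))).foldl max b0 := by
  intro n
  induction n using Nat.strong_induction_on with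
  | _ n ih =>
  intro s b0 mo hn hsf hsm hmo
  subst hmo
  by_cases hlt : first - 1 < s
  · rw [PySem.List.pyRange_neg_one_cons hlt, List.foldl_cons, List.flatMap_cons,
      List.foldl_append]
    dsimp only
    have hstart : pvMval plates s mid = pvMval plates s (max (mid - 1) mid) := by
      rw [show max (mid - 1) mid = mid from by omega]
    by_cases hs : s = mid
    · rw [if_pos hs]
      dsimp only
      rw [show (PySem.List.pyGet? plates s).getD 0 = pvMval plates s mid from by
        rw [hs]; exact (pvMval_self plates mid (by omega) (by omega)).symm]
      rw [hstart,
        pvBInner_eq plates first last mid s (by omega) hsm hlen (last + 1 - mid).toNat mid b0 rfl le_rfl]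
      rw [List.foldl_map]
      apply ih (s - 1 - (first - 1)).toNat (by omega) (s - 1) _ _ rfl (by omega) (by omega)
      rw [if_neg (show ¬ (s - 1 = mid) by omega)]
      rw [show s - 1 + 1 = s from by ring, hstart]
    · rw [if_neg hs]
      dsimp only
      rw [show min (pvMval plates (s + 1) mid) ((PySem.List.pyGet? plates s).getD 0)
            = pvMval plates s mid from by
        rw [min_comm, ← pvMval_left plates s mid (by omega) (by omega) (by omega)]]
      rw [hstart,
        pvBInner_eq plates first last mid s (by omega) hsm hlen (last + 1 - mid).toNat mid b0 rfl le_rfl]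
      rw [List.foldl_map]
      apply ih (s - 1 - (first - 1)).toNat (by omega) (s - 1) _ _ rfl (by omega) (by omega)
      rw [if_neg (show ¬ (s - 1 = mid) by omega)]
      rw [show s - 1 + 1 = s from by ring, hstart]
  · rw [PySem.List.pyRange_neg_one_eq_nil (by omega)]
    simp

lemma pvB_eq (plates : List Int) (first last : Int)
    (h0 : 0 ≤ first) (hfl : first < last) (hlen : last < (plates.length : Int)) :
    maxWidthIncluding_alt plates first last
      = (pvValsB plates first (PySem.Int.floordiv (first + last) 2) last).foldl max (-1) := by
  have hb := PySem.Int.floordiv_two_mid_bounds (le_of_lt hfl)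
  unfold maxWidthIncluding_alt pvValsB
  rw [if_neg (by omega)]
  exact pvBOuter_eq plates first last (PySem.Int.floordiv (first + last) 2) h0 hb.1 hb.2 hlen
    (PySem.Int.floordiv (first + last) 2 - (first - 1)).toNat
    (PySem.Int.floordiv (first + last) 2) (-1) none rfl (by omega) le_rfl (by rw [if_pos rfl])

-- ===== VERDICT (by name: the statement is the Claim_ definition above) =====
theorem maxWidthIncluding_spec : Claim_equal_maxWidthIncluding := by
  intro plates first last hDom hPre
  unfold Spec_maxWidthIncluding
  by_cases hfl : last ≤ first
  · have hA : maxWidthIncluding plates first last = -1 := by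
      unfold maxWidthIncluding
      rw [PySem.List.pyRange_one_eq_nil (by omega)]
      rfl
    have hB : maxWidthIncluding_alt plates first last = -1 := by
      unfold maxWidthIncluding_alt
      rw [if_pos hfl]
    rw [hA, hB]
  · have hflt : first < last := by omega
    rcases hPre with h | ⟨h0, hlen⟩
    · omega
    have hmid : Int.tdiv (first + last) 2 = PySem.Int.floordiv (first + last) 2 := by
      rw [PySem.Int.floordiv_eq_ediv_of_pos (by norm_num)]
      exact Int.tdiv_eq_ediv_of_nonneg (by omega)
    rw [pvA_eq plates first last h0, pvB_eq plates first last h0 hflt hlen, hmid]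
    apply pvFoldlMaxMemIff
    intro x
    rw [pvMemValsA, pvMemValsB]
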